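-- pv_equiv track=rewrite | github.com/Sin-tel/temper | util.py | subgroup_index
-- ===== SOURCE A (Python) =====
-- from typing import Optional, Any
--
-- def subgroup_index(s, l) -> Optional[list[int]]:
--     res = [-1] * len(l)
--     for i, k in enumerate(l):
--         for j, v in enumerate(s):
--             if v == k:
--                 res[i] = j
--     for k in res:
--         if k == -1:
--             return None
--     return res
-- ===== SOURCE B (Python) =====
-- def subgroup_index(s, l):
--     # Invert the traversal: index l by value (value -> all positions in l),
--     # then a single forward sweep over s writes j into every slot whose
--     # l-value equals s[j]; the forward order makes the LAST match win.
--     positions = {}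
--     for i, k in enumerate(l):
--         positions.setdefault(k, []).append(i)
--     res = [-1] * len(l)
--     for j, v in enumerate(s):
--         if v in positions:
--             for i in positions[v]:
--                 res[i] = j
--     if -1 in res:
--         return None
--     return res
-- ===== Notes on version B (the rewrite author's own statement) =====
-- stated objective: alternative
-- what changed: Inverts the traversal: instead of rescanning s for every element of l, B builds an index of l by value (value -> list of positions), then one forward sweep over s writes each index j into all result slots for the value s[j], so the last occurrence wins; a final membership check turns an unfilled slot into None.
import Mathlib
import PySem

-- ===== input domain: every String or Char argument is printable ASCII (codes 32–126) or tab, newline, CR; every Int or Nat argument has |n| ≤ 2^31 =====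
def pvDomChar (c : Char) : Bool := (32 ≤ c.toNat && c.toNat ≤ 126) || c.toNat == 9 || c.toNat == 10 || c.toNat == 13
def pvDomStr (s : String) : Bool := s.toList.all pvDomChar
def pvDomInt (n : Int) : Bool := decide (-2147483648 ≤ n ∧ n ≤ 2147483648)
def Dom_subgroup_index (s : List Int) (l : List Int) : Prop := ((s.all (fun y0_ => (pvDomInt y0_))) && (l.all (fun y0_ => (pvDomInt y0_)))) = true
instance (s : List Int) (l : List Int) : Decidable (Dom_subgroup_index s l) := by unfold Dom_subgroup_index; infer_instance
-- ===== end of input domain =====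

-- B inverts the traversal (alternative decomposition): it indexes l by value
-- (value -> positions), then one forward sweep over s writes each index j into every
-- slot for the value s[j] (last match wins); A rescans all of s for every element of l.

-- ===== PORT A =====
def subgroup_index (s : List Int) (l : List Int) : Option (List Int) :=
  let res0 := List.replicate l.length (-1 : Int)
  let res := (PySem.List.enumerate l 0).foldl (fun res ik =>
      (PySem.List.enumerate s 0).foldl (fun res jv =>
        if jv.2 = ik.2 then PySem.List.pySetD res ik.1 jv.1 else res) res) res0
  if res.any (fun k => k = -1) then none else some res

-- ===== PORT B =====
-- positions = {}; for i, k in enumerate(l): positions.setdefault(k, []).append(i)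
def posDict (l : List Int) : PySem.Dict Int (List Int) :=
  (PySem.List.enumerate l 0).foldl
    (fun d p => d.insert p.2 (d.getD p.2 [] ++ [p.1])) PySem.Dict.empty

-- 'if v in positions: for i in positions[v]: res[i] = j' — absent key folds over [] (no-op), exact
def subgroup_index_alt (s : List Int) (l : List Int) : Option (List Int) :=
  let positions := posDict l
  let res := (PySem.List.enumerate s 0).foldl (fun res jv =>
      (positions.getD jv.2 []).foldl (fun r i => PySem.List.pySetD r i jv.1) res)
    (List.replicate l.length (-1 : Int))
  if (-1 : Int) ∈ res then none else some res

-- ===== PRECONDITION & SPEC =====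
def Spec_subgroup_index (s : List Int) (l : List Int) (out : Option (List Int)) : Prop := out = subgroup_index_alt s l
instance (s : List Int) (l : List Int) (out : Option (List Int)) : Decidable (Spec_subgroup_index s l out) := by unfold Spec_subgroup_index; infer_instance

-- ===== CLAIM (what is proved, stated in full; the proofs are below) =====
def Claim_equal_subgroup_index : Prop := ∀ (s : List Int) (l : List Int), Dom_subgroup_index s l → Spec_subgroup_index s l (subgroup_index s l)

-- ===== LEMMAS AND PROOFS =====

-- last index of k in s, via the reversed enumeration
def lastFound (s : List Int) (k : Int) : Option Int :=
  ((PySem.List.enumerate s 0).reverse.find? (fun p => p.2 == k)).map (·.1)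

-- the intended entry for k: the last index of k in s, or -1
def gFun (s : List Int) (k : Int) : Int :=
  match lastFound s k with
  | some j => j
  | none => -1

-- overwrite at the same nonnegative index
theorem pySetD_pySetD (xs : List Int) (i : Int) (a b : Int) (h : 0 ≤ i) :
    PySem.List.pySetD (PySem.List.pySetD xs i a) i b = PySem.List.pySetD xs i b := by
  rw [PySem.List.pySetD_of_nonneg _ _ h, PySem.List.pySetD_of_nonneg _ _ h,
    PySem.List.pySetD_of_nonneg _ _ h, List.set_set]

-- A's inner loop over s sets index i to the last match (if any)
theorem inner_fold (pairs : List (Int × Int)) (res : List Int) (i k : Int) (hi : 0 ≤ i) :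
    pairs.foldl (fun res p => if p.2 = k then PySem.List.pySetD res i p.1 else res) res =
      match (pairs.reverse.find? (fun p => p.2 == k)).map (·.1) with
      | none => res
      | some j => PySem.List.pySetD res i j := by
  induction pairs generalizing res with
  | nil => simp
  | cons p rest ih =>
    rw [List.foldl_cons, ih, List.reverse_cons, List.find?_append]
    cases hf : rest.reverse.find? (fun p => p.2 == k) with
    | none =>
      by_cases hk : p.2 = k
      · have hb : (p.2 == k) = true := beq_iff_eq.mpr hk
        simp only [List.find?, hb]
        simp_all
      · have hb : (p.2 == k) = false := beq_eq_false_iff_ne.mpr hk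
        simp only [List.find?, hb]
        simp_all
    | some q =>
      by_cases hk : p.2 = k
      · simp [Option.or, pySetD_pySetD _ _ _ _ hi, hk]
      · simp [Option.or, hk]

-- helper: set at the junction of an append
theorem set_append_len (pre t : List Int) (x v : Int) :
    (pre ++ x :: t).set pre.length v = pre ++ v :: t := by
  rw [List.set_append]
  simp

-- A's outer loop fills positions |pre|.. with gFun values
theorem outer_fold (s : List Int) (l2 pre : List Int) :
    (PySem.List.enumerate l2 (pre.length : Int)).foldl
      (fun res ik => match lastFound s ik.2 with
        | none => res
        | some j => PySem.List.pySetD res ik.1 j)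
      (pre ++ List.replicate l2.length (-1)) = pre ++ l2.map (gFun s) := by
  induction l2 generalizing pre with
  | nil => simp
  | cons k rest ih =>
    rw [PySem.List.enumerate_cons, List.foldl_cons, List.length_cons, List.replicate_succ]
    have hcast : (pre.length : Int) + 1 = ((pre ++ [gFun s k]).length : Int) := by
      simp
    cases hf : lastFound s k with
    | none =>
      have hg : gFun s k = -1 := by unfold gFun; rw [hf]
      have h1 : pre ++ (-1 : Int) :: List.replicate rest.length (-1)
          = (pre ++ [gFun s k]) ++ List.replicate rest.length (-1) := by
        simp [hg]
      simp only [h1, hcast]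
      rw [ih (pre ++ [gFun s k])]
      simp
    | some j =>
      have hg : gFun s k = j := by unfold gFun; rw [hf]
      have h1 : PySem.List.pySetD (pre ++ (-1 : Int) :: List.replicate rest.length (-1)) (pre.length : Int) j
          = (pre ++ [gFun s k]) ++ List.replicate rest.length (-1) := by
        rw [PySem.List.pySetD_natCast, set_append_len]
        simp [hg]
      simp only [h1, hcast]
      rw [ih (pre ++ [gFun s k])]
      simp

-- characterization of port A
theorem A_char (s l : List Int) :
    subgroup_index s l =
      if (l.map (gFun s)).any (fun k => k = -1) then none else some (l.map (gFun s)) := by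
  unfold subgroup_index
  have hcongr : (PySem.List.enumerate l 0).foldl
      (fun res ik => (PySem.List.enumerate s 0).foldl
        (fun res jv => if jv.2 = ik.2 then PySem.List.pySetD res ik.1 jv.1 else res) res)
      (List.replicate l.length (-1))
    = (PySem.List.enumerate l 0).foldl
      (fun res ik => match lastFound s ik.2 with
        | none => res
        | some j => PySem.List.pySetD res ik.1 j)
      (List.replicate l.length (-1)) := by
    apply PySem.List.foldl_congr_mem
    intro acc x hx
    rw [PySem.List.mem_enumerate_iff] at hx
    obtain ⟨m, hm, hxeq⟩ := hx
    have hi : (0 : Int) ≤ x.1 := by subst hxeq; simp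
    rw [inner_fold _ _ _ _ hi]
    rfl
  simp only [hcongr]
  have := outer_fold s l []
  simp only [List.nil_append, List.length_nil, Int.natCast_zero] at this
  rw [this]

-- the positions dict: getD k [] is the list of first components of the pairs with second component k
theorem posFold_getD (pairs : List (Int × Int)) (d : PySem.Dict Int (List Int)) (k : Int) :
    (pairs.foldl (fun d p => d.insert p.2 (d.getD p.2 [] ++ [p.1])) d).getD k [] =
      d.getD k [] ++ (pairs.filter (fun p => p.2 == k)).map (·.1) := by
  induction pairs generalizing d with
  | nil => simp
  | cons p rest ih =>
    rw [List.foldl_cons, ih, PySem.Dict.getD_insert]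
    by_cases hk : k = p.2
    · have hb : (p.2 == k) = true := beq_iff_eq.mpr hk.symm
      simp [hk]
    · have hb : (p.2 == k) = false := beq_eq_false_iff_ne.mpr (fun h => hk h.symm)
      simp [hk, hb]

theorem posDict_getD (l : List Int) (k : Int) :
    (posDict l).getD k [] = ((PySem.List.enumerate l 0).filter (fun p => p.2 == k)).map (·.1) := by
  unfold posDict
  rw [posFold_getD]
  simp

-- membership in the positions list
theorem mem_posDict (l : List Int) (k i : Int) :
    i ∈ (posDict l).getD k [] ↔ ∃ (m : Nat) (h : m < l.length), i = (m : Int) ∧ l[m] = k := by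
  rw [posDict_getD]
  simp only [List.mem_map, List.mem_filter]
  constructor
  · rintro ⟨p, ⟨hmem, hk⟩, hi⟩
    rw [PySem.List.mem_enumerate_iff] at hmem
    obtain ⟨m, hm, hp⟩ := hmem
    subst hp
    simp at hk hi
    exact ⟨m, hm, by omega, hk⟩
  · rintro ⟨m, hm, hi, hk⟩
    refine ⟨((m : Int), l[m]), ⟨?_, by simp [hk]⟩, by simp [hi]⟩
    rw [PySem.List.mem_enumerate_iff]
    exact ⟨m, hm, by simp⟩

-- all positions are in range
theorem posDict_range (l : List Int) (k i : Int) (h : i ∈ (posDict l).getD k []) :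
    0 ≤ i ∧ i < (l.length : Int) := by
  rw [mem_posDict] at h
  obtain ⟨m, hm, hi, _⟩ := h
  omega

-- folding pySetD over a list of in-range indices: elementwise description
theorem setFold_get (ps : List Int) (res : List Int) (j : Int) (m : Nat)
    (hps : ∀ i ∈ ps, 0 ≤ i ∧ i < (res.length : Int)) :
    (ps.foldl (fun r i => PySem.List.pySetD r i j) res)[m]? =
      if (m : Int) ∈ ps then (if m < res.length then some j else none) else res[m]? := by
  induction ps generalizing res with
  | nil => simp
  | cons i rest ih =>
    rw [List.foldl_cons]
    have hi := (hps i (by simp)).1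
    have hilt := (hps i (by simp)).2
    have hlen : (PySem.List.pySetD res i j).length = res.length := by
      rw [PySem.List.pySetD_of_nonneg _ _ hi]; simp
    rw [ih _ (fun x hx => by rw [hlen]; exact hps x (by simp [hx]))]
    rw [hlen]
    by_cases hmem : (m : Int) ∈ rest
    · simp [hmem]
    · simp only [hmem, if_false, List.mem_cons]
      rw [PySem.List.pySetD_of_nonneg _ _ hi, List.getElem?_set]
      by_cases heq : (m : Int) = i
      · have ht : i.toNat = m := by omega
        by_cases hm : m < res.length
        · simp [ht, heq, hm]
        · simp [ht, heq, hm]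
      · have ht : ¬ i.toNat = m := by omega
        simp [ht, heq]

-- last index over an append of a single element
theorem lastFound_append (s : List Int) (v k : Int) :
    lastFound (s ++ [v]) k = if v = k then some (s.length : Int) else lastFound s k := by
  unfold lastFound
  rw [PySem.List.enumerate_append, List.reverse_append]
  simp only [PySem.List.enumerate_cons, PySem.List.enumerate_nil, List.reverse_cons,
    List.reverse_nil, List.nil_append, List.cons_append]
  by_cases hv : v = k
  · rw [List.find?_cons_of_pos (by simp [hv]), if_pos hv]
    simp
  · rw [List.find?_cons_of_neg (by simp [hv]), if_neg hv]

theorem gFun_append (s : List Int) (v k : Int) :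
    gFun (s ++ [v]) k = if v = k then (s.length : Int) else gFun s k := by
  unfold gFun
  rw [lastFound_append]
  by_cases hv : v = k <;> simp [hv]

-- B's sweep over s produces exactly the map of gFun
theorem sweep_eq (s l : List Int) :
    (PySem.List.enumerate s 0).foldl (fun res jv =>
        ((posDict l).getD jv.2 []).foldl (fun r i => PySem.List.pySetD r i jv.1) res)
      (List.replicate l.length (-1 : Int)) = l.map (gFun s) := by
  induction s using List.reverseRecOn with
  | nil =>
    simp only [PySem.List.enumerate_nil, List.foldl_nil]
    apply List.ext_getElem (by simp)
    intro m h1 h2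
    have hm : m < l.length := by simpa using h1
    have : gFun [] l[m] = -1 := by
      unfold gFun lastFound
      simp [PySem.List.enumerate_nil]
    simp [this]
  | append_singleton s' v ih =>
    rw [PySem.List.enumerate_append, List.foldl_append, ih]
    simp only [PySem.List.enumerate_cons, PySem.List.enumerate_nil, List.foldl_cons, List.foldl_nil]
    have hlen : (l.map (gFun s')).length = l.length := by simp
    apply List.ext_getElem?
    intro m
    rw [setFold_get _ _ _ m (fun i hi => by rw [hlen]; exact posDict_range l v i hi)]
    by_cases hmem : (m : Int) ∈ (posDict l).getD v []
    · rw [if_pos hmem]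
      have hrange := posDict_range l v _ hmem
      have hm : m < l.length := by omega
      have hk : l[m] = v := by
        rw [mem_posDict] at hmem
        obtain ⟨m', hm', hi, hk⟩ := hmem
        have hmm : m' = m := by omega
        subst hmm; exact hk
      rw [if_pos (by omega : m < (l.map (gFun s')).length)]
      rw [List.getElem?_map, List.getElem?_eq_getElem hm]
      simp [gFun_append, hk]
    · rw [if_neg hmem]
      rw [mem_posDict] at hmem
      by_cases hm : m < l.length
      · have hk : ¬ l[m] = v := fun h => hmem ⟨m, hm, rfl, h⟩
        rw [List.getElem?_map, List.getElem?_map, List.getElem?_eq_getElem hm]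
        simp only [Option.map_some, Option.some.injEq, gFun_append]
        rw [if_neg (fun h => hk h.symm)]
      · rw [List.getElem?_eq_none (by simpa using hm), List.getElem?_eq_none (by simpa using hm)]

-- characterization of port B
theorem B_char (s l : List Int) :
    subgroup_index_alt s l =
      if (l.map (gFun s)).any (fun k => k = -1) then none else some (l.map (gFun s)) := by
  unfold subgroup_index_alt
  simp only [sweep_eq]
  by_cases h : (-1 : Int) ∈ l.map (gFun s)
  · have : (l.map (gFun s)).any (fun k => k = -1) = true := by
      simp only [List.any_eq_true]
      exact ⟨-1, h, by simp⟩
    simp [h, this]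
  · have : (l.map (gFun s)).any (fun k => k = -1) = false := by
      simp only [List.any_eq_false]
      intro x hx
      simp only [decide_eq_true_eq]
      intro hx1; subst hx1; exact h hx
    simp [h, this]

-- ===== VERDICT (by name: the statement is the Claim_ definition above) =====
theorem subgroup_index_spec : Claim_equal_subgroup_index := by
  intro s l _
  unfold Spec_subgroup_index
  rw [A_char, B_char]
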